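-- pv_equiv track=rewrite | github.com/hiyamgh/Forecasting-Demand-Primary-Health-Care | old_stuff/generate_multivariate_datasubsets.py | generate_df_name
-- ===== SOURCE A (Python) =====
-- def generate_df_name(file_name):
--     services = ['General Medicine', 'Gynaecology', 'Pediatrics', 'Pharmacy']
--     mohafazas = ['akkar', 'bikaa', 'Tripoli']
--     for service in services:
--         for mohafaza in mohafazas:
--             if service in file_name and mohafaza in file_name:
--                 dir = service + '_' + mohafaza
--                 return dir, service, mohafaza
-- ===== SOURCE B (Python) =====
-- def generate_df_name(file_name):
--     services = ['General Medicine', 'Gynaecology', 'Pediatrics', 'Pharmacy']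
--     mohafazas = ['akkar', 'bikaa', 'Tripoli']
--     service = next((s for s in services if s in file_name), None)
--     mohafaza = next((m for m in mohafazas if m in file_name), None)
--     if service is not None and mohafaza is not None:
--         return service + '_' + mohafaza, service, mohafaza
-- ===== Notes on version B (the rewrite author's own statement) =====
-- stated objective: simpler
-- what changed: Replaces the nested service-by-mohafaza product loop with two independent single-pass searches (first matching service, first matching mohafaza), combined only at the end; valid since mohafaza membership does not depend on the service.
import Mathlib
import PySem

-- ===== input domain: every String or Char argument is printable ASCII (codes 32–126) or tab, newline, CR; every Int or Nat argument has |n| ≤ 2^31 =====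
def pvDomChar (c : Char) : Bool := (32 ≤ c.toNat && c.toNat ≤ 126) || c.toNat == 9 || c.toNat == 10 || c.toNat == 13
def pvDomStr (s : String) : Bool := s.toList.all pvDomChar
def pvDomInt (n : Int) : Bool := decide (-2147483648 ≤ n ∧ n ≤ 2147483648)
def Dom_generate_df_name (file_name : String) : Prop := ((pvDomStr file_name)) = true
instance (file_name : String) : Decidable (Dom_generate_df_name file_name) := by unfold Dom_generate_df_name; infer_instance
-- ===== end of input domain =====

-- B replaces A's nested service×mohafaza loop by two independent first-match searches (simpler).

-- ===== PORT A =====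
-- inner loop: for mohafaza in mohafazas
def genA_inner (file_name service : String) : List String → Option (String × String × String)
  | [] => none
  | m :: ms =>
    if PySem.Str.isIn service file_name && PySem.Str.isIn m file_name then
      some (service ++ "_" ++ m, service, m)
    else genA_inner file_name service ms

-- outer loop: for service in services
def genA_outer (file_name : String) (mohafazas : List String) : List String → Option (String × String × String)
  | [] => none
  | s :: ss =>
    match genA_inner file_name s mohafazas with
    | some r => some r
    | none => genA_outer file_name mohafazas ss

def generate_df_name (file_name : String) : Option (String × String × String) :=
  let services := ["General Medicine", "Gynaecology", "Pediatrics", "Pharmacy"]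
  let mohafazas := ["akkar", "bikaa", "Tripoli"]
  genA_outer file_name mohafazas services

-- ===== PORT B =====
def generate_df_name_alt (file_name : String) : Option (String × String × String) :=
  let services := ["General Medicine", "Gynaecology", "Pediatrics", "Pharmacy"]
  let mohafazas := ["akkar", "bikaa", "Tripoli"]
  let service := services.find? (fun s => PySem.Str.isIn s file_name)
  let mohafaza := mohafazas.find? (fun m => PySem.Str.isIn m file_name)
  match service, mohafaza with
  | some s, some m => some (s ++ "_" ++ m, s, m)
  | _, _ => none

-- ===== PRECONDITION & SPEC =====
def Spec_generate_df_name (file_name : String) (out : Option (String × String × String)) : Prop := out = generate_df_name_alt file_name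
instance (file_name : String) (out : Option (String × String × String)) : Decidable (Spec_generate_df_name file_name out) := by unfold Spec_generate_df_name; infer_instance

-- ===== CLAIM (what is proved, stated in full; the proofs are below) =====
def Claim_equal_generate_df_name : Prop := ∀ (file_name : String), Dom_generate_df_name file_name → Spec_generate_df_name file_name (generate_df_name file_name)

-- ===== LEMMAS AND PROOFS =====

-- ===== VERDICT (by name: the statement is the Claim_ definition above) =====
set_option maxHeartbeats 1000000 in
theorem generate_df_name_spec : Claim_equal_generate_df_name := by
  intro f _
  unfold Spec_generate_df_name generate_df_name generate_df_name_alt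
  cases h1 : PySem.Str.isIn "General Medicine" f <;>
  cases h2 : PySem.Str.isIn "Gynaecology" f <;>
  cases h3 : PySem.Str.isIn "Pediatrics" f <;>
  cases h4 : PySem.Str.isIn "Pharmacy" f <;>
  cases h5 : PySem.Str.isIn "akkar" f <;>
  cases h6 : PySem.Str.isIn "bikaa" f <;>
  cases h7 : PySem.Str.isIn "Tripoli" f <;>
  simp only [genA_outer, genA_inner, List.find?, h1, h2, h3, h4, h5, h6, h7,
    Bool.and_true, Bool.and_false, if_true, if_false, Bool.false_eq_true]
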